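-- pv_equiv track=rewrite | github.com/smallcatx0/daydayup | leetcode/219.contains-duplicate-ii.py | containsNearbyDuplicate1
-- ===== SOURCE A (Python) =====
-- from typing import List
--
-- def containsNearbyDuplicate1(nums: List[int], k: int) -> bool:
--     if len(nums) == 0 or k == 0: return False
--     searchSet = set((nums[0],))
--     for i in range(1, len(nums)):
--         if nums[i] in searchSet:
--             return True
--         searchSet.add(nums[i])
--         if len(searchSet) >= k + 1:
--             searchSet.remove(nums[i-k])
--     return False
-- ===== SOURCE B (Python) =====
-- def containsNearbyDuplicate1(nums, k):
--     last = {}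
--     for i, v in enumerate(nums):
--         if v in last and i - last[v] <= k:
--             return True
--         last[v] = i
--     return False
-- ===== Notes on version B (the rewrite author's own statement) =====
-- stated objective: idiomatic
-- what changed: Replaces A's sliding-window set with k-step eviction by a single pass keeping a dict of each value's last-seen index and testing the index difference directly.
-- outside the precondition, e.g. on containsNearbyDuplicate1([0, 0], -1): A returns True, B returns False
import Mathlib
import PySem

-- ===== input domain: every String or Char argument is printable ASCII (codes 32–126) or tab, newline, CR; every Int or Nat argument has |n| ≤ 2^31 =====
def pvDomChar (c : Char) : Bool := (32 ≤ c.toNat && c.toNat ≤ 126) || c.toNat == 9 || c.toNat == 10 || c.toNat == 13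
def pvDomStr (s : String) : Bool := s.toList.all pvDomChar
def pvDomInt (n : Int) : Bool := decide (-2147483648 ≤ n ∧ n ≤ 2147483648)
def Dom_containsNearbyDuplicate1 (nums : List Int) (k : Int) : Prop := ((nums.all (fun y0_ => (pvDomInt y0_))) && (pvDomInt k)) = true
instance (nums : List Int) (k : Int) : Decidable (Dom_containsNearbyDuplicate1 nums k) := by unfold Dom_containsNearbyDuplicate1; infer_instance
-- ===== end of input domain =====

-- B replaces A's sliding-window set (with its k-step eviction) by one pass over
-- enumerate(nums) keeping a dict of each value's last-seen index; return value only, no mutation.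

-- ===== PORT A =====
-- the for-loop of A over range(1, len(nums)), state = the window set
def pvALoop (nums : List Int) (k : Int) : List Int → PySem.Set Int → Bool
  | [], _ => false
  | i :: rest, s =>
    match PySem.List.pyGet? nums i with
    | none => false  -- IndexError (unreachable: i ∈ range(1, len(nums)))
    | some v =>
      if PySem.Set.contains s v then true
      else
        let s' := PySem.Set.add s v
        if k + 1 ≤ (s'.length : Int) then  -- len(searchSet) >= k + 1
          match PySem.List.pyGet? nums (i - k) with
          | none => false  -- IndexError in Python (nums[i-k] out of range)
          | some w =>
            match PySem.Set.remove? s' w with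
            | none => false  -- KeyError in Python (w not in the set)
            | some s'' => pvALoop nums k rest s''
        else pvALoop nums k rest s'

def containsNearbyDuplicate1 (nums : List Int) (k : Int) : Bool :=
  if nums.length = 0 ∨ k = 0 then false
  else
    match PySem.List.pyGet? nums 0 with
    | none => false  -- unreachable: nums is nonempty here
    | some x0 =>
      pvALoop nums k (PySem.List.pyRange 1 (nums.length : Int) 1) (PySem.Set.ofList [x0])

-- ===== PORT B =====
-- the for-loop of B over enumerate(nums), state = the last-seen-index dict
def pvBLoop (k : Int) : List (Int × Int) → PySem.Dict Int Int → Bool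
  | [], _ => false
  | (i, v) :: rest, last =>
    match PySem.Dict.get? last v with
    | some j =>
      if i - j ≤ k then true
      else pvBLoop k rest (PySem.Dict.insert last v i)
    | none => pvBLoop k rest (PySem.Dict.insert last v i)

def containsNearbyDuplicate1_alt (nums : List Int) (k : Int) : Bool :=
  pvBLoop k (PySem.List.enumerate nums 0) PySem.Dict.empty

-- ===== PRECONDITION & SPEC =====
-- Pre_ excludes negative k, on which A raises IndexError/KeyError on most inputs via its
-- eviction index i-k and, where it does return, its True is an accident of that eviction
-- logic (no pair lies within a negative index distance); B returns False there.
def Pre_containsNearbyDuplicate1 (nums : List Int) (k : Int) : Prop := 0 ≤ k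
instance (nums : List Int) (k : Int) : Decidable (Pre_containsNearbyDuplicate1 nums k) := by unfold Pre_containsNearbyDuplicate1; infer_instance
def pvWitness_containsNearbyDuplicate1 : List Int × Int := ([1, 0, 1], 2)

def Spec_containsNearbyDuplicate1 (nums : List Int) (k : Int) (out : Bool) : Prop := out = containsNearbyDuplicate1_alt nums k
instance (nums : List Int) (k : Int) (out : Bool) : Decidable (Spec_containsNearbyDuplicate1 nums k out) := by unfold Spec_containsNearbyDuplicate1; infer_instance

-- ===== CLAIM (what is proved, stated in full; the proofs are below) =====
def Claim_equal_containsNearbyDuplicate1 : Prop := ∀ (nums : List Int) (k : Int), Dom_containsNearbyDuplicate1 nums k → Pre_containsNearbyDuplicate1 nums k → Spec_containsNearbyDuplicate1 nums k (containsNearbyDuplicate1 nums k)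

-- ===== LEMMAS AND PROOFS =====

-- the common specification: a duplicate pair (i, j) with j in [m, len) and j - i ≤ k
def pvDup (nums : List Int) (k : Int) (m : Nat) : Prop :=
  ∃ i j : Nat, i < j ∧ m ≤ j ∧ j < nums.length ∧
    nums.getD i 0 = nums.getD j 0 ∧ (j : Int) - (i : Int) ≤ k

theorem pvDup_weaken (nums : List Int) (k : Int) (m : Nat)
    (h : pvDup nums k (m + 1)) : pvDup nums k m := by
  obtain ⟨i, j, h1, h2, h3, h4, h5⟩ := h
  exact ⟨i, j, h1, by omega, h3, h4, h5⟩

-- B's loop returns true iff a duplicate pair with second index ≥ m exists,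
-- provided d records last-seen indices of the prefix [0, m)
theorem pvB_iff (nums : List Int) (k : Int) :
    ∀ (tail : List Int) (m : Nat) (d : PySem.Dict Int Int),
      nums.drop m = tail →
      (∀ v j, d.get? v = some j → ∃ jn : Nat, j = (jn : Int) ∧ jn < m ∧ nums.getD jn 0 = v) →
      (∀ i : Nat, i < m → ∃ j : Int, d.get? (nums.getD i 0) = some j ∧ (i : Int) ≤ j) →
      (pvBLoop k (PySem.List.enumerate tail (m : Int)) d = true ↔ pvDup nums k m) := by
  intro tail
  induction tail with
  | nil =>
    intro m d hdrop _ _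
    have hlen : nums.length ≤ m := by
      have := List.drop_eq_nil_iff.mp hdrop
      omega
    rw [PySem.List.enumerate_nil]
    simp only [pvBLoop, Bool.false_eq_true, false_iff]
    rintro ⟨i, j, _, _, h3, _, _⟩; omega
  | cons v rest ih =>
    intro m d hdrop hinv1 hinv2
    have hmlt : m < nums.length := by
      by_contra h
      rw [List.drop_eq_nil_iff.mpr (by omega)] at hdrop
      exact absurd hdrop (by simp)
    have hrest : nums.drop (m + 1) = rest := by
      have h := congrArg (List.drop 1) hdrop
      simpa [List.drop_drop, Nat.add_comm] using h
    have hv : nums.getD m 0 = v := by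
      have h := congrArg (fun l => l[0]?) hdrop
      simp only [List.getElem?_drop, Nat.add_zero] at h
      simp only [List.getElem?_cons_zero] at h
      rw [List.getD_eq_getElem?_getD, h]; rfl
    have hcast : (m : Int) + 1 = ((m + 1 : Nat) : Int) := by push_cast; ring
    rw [PySem.List.enumerate_cons, hcast]
    -- invariants for the updated dict
    have hinv1' : ∀ v' j', (d.insert v (m : Int)).get? v' = some j' →
        ∃ jn : Nat, j' = (jn : Int) ∧ jn < m + 1 ∧ nums.getD jn 0 = v' := by
      intro v' j' h
      rw [PySem.Dict.get?_insert] at h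
      by_cases hv' : v' = v
      · rw [if_pos hv'] at h
        exact ⟨m, by injection h with h; omega, by omega, by rw [hv, hv']⟩
      · rw [if_neg hv'] at h
        obtain ⟨jn, h1, h2, h3⟩ := hinv1 v' j' h
        exact ⟨jn, h1, by omega, h3⟩
    have hinv2' : ∀ i : Nat, i < m + 1 →
        ∃ j : Int, (d.insert v (m : Int)).get? (nums.getD i 0) = some j ∧ (i : Int) ≤ j := by
      intro i hi
      by_cases hvi : nums.getD i 0 = v
      · exact ⟨(m : Int), by rw [hvi, PySem.Dict.get?_insert, if_pos rfl], by omega⟩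
      · have hi' : i < m := by
          rcases Nat.lt_succ_iff_lt_or_eq.mp hi with h | h
          · exact h
          · exact absurd (h ▸ hv) hvi
        obtain ⟨j0, hj0, hij⟩ := hinv2 i hi'
        exact ⟨j0, by rw [PySem.Dict.get?_insert, if_neg hvi]; exact hj0, hij⟩
    rcases hgd : PySem.Dict.get? d v with _ | j
    · -- v not yet seen: record it and continue
      have hstep : pvBLoop k (((m : Int), v) :: PySem.List.enumerate rest ((m + 1 : Nat) : Int)) d
          = pvBLoop k (PySem.List.enumerate rest ((m + 1 : Nat) : Int)) (d.insert v (m : Int)) := by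
        simp [pvBLoop, hgd]
      rw [hstep, ih (m + 1) (d.insert v (m : Int)) hrest hinv1' hinv2']
      constructor
      · exact pvDup_weaken nums k m
      · rintro ⟨i, j, h1, h2, h3, h4, h5⟩
        rcases Nat.eq_or_lt_of_le h2 with h | h
        · exfalso
          obtain ⟨j0, hj0, _⟩ := hinv2 i (by omega)
          rw [show nums.getD i 0 = v by rw [h4, ← h, hv]] at hj0
          rw [hgd] at hj0; exact absurd hj0 (by simp)
        · exact ⟨i, j, h1, by omega, h3, h4, h5⟩
    · by_cases hle : (m : Int) - j ≤ k
      · -- duplicate within distance k found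
        have hstep : pvBLoop k (((m : Int), v) :: PySem.List.enumerate rest ((m + 1 : Nat) : Int)) d
            = true := by
          simp [pvBLoop, hgd, hle]
        rw [hstep]
        obtain ⟨jn, hj1, hj2, hj3⟩ := hinv1 v j hgd
        simp only [true_iff]
        exact ⟨jn, m, by omega, le_rfl, hmlt, by rw [hj3, hv], by omega⟩
      · -- last occurrence too far: overwrite and continue
        have hstep : pvBLoop k (((m : Int), v) :: PySem.List.enumerate rest ((m + 1 : Nat) : Int)) d
            = pvBLoop k (PySem.List.enumerate rest ((m + 1 : Nat) : Int)) (d.insert v (m : Int)) := by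
          simp [pvBLoop, hgd, hle]
        rw [hstep, ih (m + 1) (d.insert v (m : Int)) hrest hinv1' hinv2']
        constructor
        · exact pvDup_weaken nums k m
        · rintro ⟨i, j', h1, h2, h3, h4, h5⟩
          rcases Nat.eq_or_lt_of_le h2 with h | h
          · exfalso
            obtain ⟨j0, hj0, hij⟩ := hinv2 i (by omega)
            rw [show nums.getD i 0 = v by rw [h4, ← h, hv]] at hj0
            rw [hgd] at hj0
            injection hj0 with hj0
            apply hle; omega
          · exact ⟨i, j', h1, by omega, h3, h4, h5⟩

-- A's loop returns true iff a duplicate pair with second index ≥ m exists,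
-- provided s is (a permutation of) the values in the current window
theorem pvA_iff (nums : List Int) (k : Int) (hk : 1 ≤ k) :
    ∀ (tail : List Int) (m : Nat) (s : PySem.Set Int),
      tail = PySem.List.pyRange (m : Int) (nums.length : Int) 1 →
      1 ≤ m → m ≤ nums.length →
      List.Perm s ((List.range' (m - min m k.toNat) (min m k.toNat)).map (fun j => nums.getD j 0)) →
      List.Nodup s →
      (pvALoop nums k tail s = true ↔ pvDup nums k m) := by
  intro tail
  induction tail with
  | nil =>
    intro m s htail _ _ _ _
    have hml : nums.length ≤ m := by
      by_contra h
      rw [PySem.List.pyRange_one_cons (by exact_mod_cast Nat.lt_of_not_le h)] at htail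
      exact absurd htail (by simp)
    simp only [pvALoop, Bool.false_eq_true, false_iff]
    rintro ⟨i, j, _, _, h3, _, _⟩; omega
  | cons x rest ih =>
    intro m s htail h1m hmlen hperm hnd
    have hmlt : m < nums.length := by
      by_contra h
      rw [PySem.List.pyRange_one_eq_nil (by exact_mod_cast Nat.le_of_not_lt h)] at htail
      exact absurd htail (by simp)
    rw [PySem.List.pyRange_one_cons (by exact_mod_cast hmlt)] at htail
    have hx : x = (m : Int) := by injection htail
    have hrest : rest = PySem.List.pyRange ((m : Int) + 1) (nums.length : Int) 1 := by
      injection htail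
    subst hx
    have hknk : (k.toNat : Int) = k := Int.toNat_of_nonneg (by omega)
    have hkn1 : 1 ≤ k.toNat := by omega
    have hlow : (m - min m k.toNat) + min m k.toNat = m := by omega
    have hget : PySem.List.pyGet? nums (m : Int) = some (nums.getD m 0) := by
      rw [PySem.List.pyGet?_natCast, List.getElem?_eq_getElem hmlt]
      congr 1
      exact (List.getD_eq_getElem nums 0 hmlt).symm
    have hmemiff : PySem.Set.contains s (nums.getD m 0) = true ↔
        ∃ i : Nat, i < m ∧ nums.getD i 0 = nums.getD m 0 ∧ (m : Int) - i ≤ k := by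
      rw [PySem.Set.contains_iff, hperm.mem_iff]
      constructor
      · intro hmem
        simp only [List.mem_map, List.mem_range'_1] at hmem
        obtain ⟨i, ⟨hi1, hi2⟩, hival⟩ := hmem
        refine ⟨i, by omega, hival, ?_⟩
        have : m - i ≤ k.toNat := by omega
        omega
      · rintro ⟨i, hilt, hival, hdist⟩
        simp only [List.mem_map]
        refine ⟨i, ?_, hival⟩
        rw [List.mem_range'_1]
        have : (m : Int) - i ≤ (k.toNat : Int) := by rw [hknk]; exact hdist
        constructor <;> omega
    rcases hc : PySem.Set.contains s (nums.getD m 0) with _ | _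
    · -- nums[m] not in the window: add it, maybe evict
      have hvnot : nums.getD m 0 ∉ s := by
        intro h
        have h' := (PySem.Set.contains_iff s (nums.getD m 0)).mpr h
        rw [hc] at h'
        exact Bool.false_ne_true h'
      have hadd : PySem.Set.add s (nums.getD m 0) = s ++ [nums.getD m 0] :=
        PySem.Set.add_of_not_mem hvnot
      have hlens : s.length = min m k.toNat := by
        rw [hperm.length_eq, List.length_map, List.length_range']
      have hnodupm : ¬∃ i : Nat, i < m ∧ nums.getD i 0 = nums.getD m 0 ∧ (m : Int) - i ≤ k := by
        intro h
        have h' := hmemiff.mpr h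
        rw [hc] at h'
        exact Bool.false_ne_true h'
      have hiff01 : pvDup nums k (m + 1) ↔ pvDup nums k m := by
        constructor
        · exact pvDup_weaken nums k m
        · rintro ⟨i, j, h1, h2, h3, h4, h5⟩
          rcases Nat.eq_or_lt_of_le h2 with h | h
          · exact absurd ⟨i, by omega, by rw [h4, ← h], by rw [← h] at h5; exact h5⟩ hnodupm
          · exact ⟨i, j, h1, by omega, h3, h4, h5⟩
      -- the appended set is a permutation of the window extended on the right
      have hnd' : List.Nodup (s ++ [nums.getD m 0]) := by
        rw [List.nodup_append]
        exact ⟨hnd, List.nodup_singleton _,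
          fun a ha b hb => by rw [List.mem_singleton] at hb; subst hb; exact fun h => hvnot (h ▸ ha)⟩
      have hperm' : List.Perm (s ++ [nums.getD m 0])
          ((List.range' (m - min m k.toNat) (min m k.toNat + 1)).map (fun j => nums.getD j 0)) := by
        have hr : List.range' (m - min m k.toNat) (min m k.toNat + 1)
            = List.range' (m - min m k.toNat) (min m k.toNat) ++ [m] := by
          rw [List.range'_1_concat, hlow]
        rw [hr, List.map_append]
        exact hperm.append_right _
      have hlen' : ((s ++ [nums.getD m 0]).length : Int) = (min m k.toNat : Int) + 1 := by
        simp [hlens]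
      by_cases hev : k + 1 ≤ ((s ++ [nums.getD m 0]).length : Int)
      · -- eviction: the window is full (its size is k)
        have hwkn : min m k.toNat = k.toNat := by rw [hlen'] at hev; omega
        have hknm : k.toNat ≤ m := by omega
        have hlolt : m - k.toNat < nums.length := by omega
        have hgetlo : PySem.List.pyGet? nums ((m : Int) - k)
            = some (nums.getD (m - k.toNat) 0) := by
          have hcast : (m : Int) - k = ((m - k.toNat : Nat) : Int) := by
            rw [← hknk]; push_cast; omega
          rw [hcast, PySem.List.pyGet?_natCast, List.getElem?_eq_getElem hlolt]
          congr 1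
          exact (List.getD_eq_getElem nums 0 hlolt).symm
        have hr : List.range' (m - min m k.toNat) (min m k.toNat + 1)
            = (m - k.toNat) :: List.range' (m - k.toNat + 1) k.toNat := by
          rw [hwkn, List.range'_succ]
        have hpermT : List.Perm (s ++ [nums.getD m 0])
            (nums.getD (m - k.toNat) 0 ::
              (List.range' (m - k.toNat + 1) k.toNat).map (fun j => nums.getD j 0)) := by
          rw [hr] at hperm'
          simpa using hperm'
        have hTnodup : (nums.getD (m - k.toNat) 0 ::
            (List.range' (m - k.toNat + 1) k.toNat).map (fun j => nums.getD j 0)).Nodup :=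
          (hpermT.nodup_iff).mp hnd'
        have hxnotT : nums.getD (m - k.toNat) 0 ∉
            (List.range' (m - k.toNat + 1) k.toNat).map (fun j => nums.getD j 0) :=
          (List.nodup_cons.mp hTnodup).1
        have hlomem : nums.getD (m - k.toNat) 0 ∈ s ++ [nums.getD m 0] := by
          rw [hpermT.mem_iff]; exact List.mem_cons_self
        have hrem : PySem.Set.remove? (s ++ [nums.getD m 0]) (nums.getD (m - k.toNat) 0)
            = some ((s ++ [nums.getD m 0]).discard (nums.getD (m - k.toNat) 0)) :=
          PySem.Set.remove?_of_mem hlomem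
        have hnd'' : List.Nodup ((s ++ [nums.getD m 0]).discard (nums.getD (m - k.toNat) 0)) :=
          PySem.Set.nodup_discard _ _ hnd'
        have hperm'' : List.Perm ((s ++ [nums.getD m 0]).discard (nums.getD (m - k.toNat) 0))
            ((List.range' ((m + 1) - min (m + 1) k.toNat) (min (m + 1) k.toNat)).map
              (fun j => nums.getD j 0)) := by
          have hmin : min (m + 1) k.toNat = k.toNat := by omega
          rw [hmin, show m + 1 - k.toNat = m - k.toNat + 1 by omega]
          rw [List.perm_ext_iff_of_nodup hnd'' (List.nodup_cons.mp hTnodup).2]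
          intro a
          rw [PySem.Set.mem_discard, hpermT.mem_iff, List.mem_cons]
          constructor
          · rintro ⟨h1 | h1, h2⟩
            · exact absurd h1 h2
            · exact h1
          · intro h1
            exact ⟨Or.inr h1, fun h => hxnotT (h ▸ h1)⟩
        have hstep : pvALoop nums k ((m : Int) :: rest) s
            = pvALoop nums k rest
                ((s ++ [nums.getD m 0]).discard (nums.getD (m - k.toNat) 0)) := by
          simp only [pvALoop, hget]
          rw [if_neg (by rw [hc]; simp), hadd, if_pos hev]
          simp only [hgetlo, hrem]
        rw [hstep]
        have hcast1 : (m : Int) + 1 = ((m + 1 : Nat) : Int) := by push_cast; ring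
        rw [ih (m + 1) _ (by rw [hrest, hcast1]) (by omega) (by omega) hperm'' hnd'']
        exact hiff01
      · -- no eviction: the window still grows
        have hwm : min m k.toNat = m := by rw [hlen'] at hev; omega
        have hperm'' : List.Perm (s ++ [nums.getD m 0])
            ((List.range' ((m + 1) - min (m + 1) k.toNat) (min (m + 1) k.toNat)).map
              (fun j => nums.getD j 0)) := by
          have hmin : min (m + 1) k.toNat = m + 1 := by omega
          rw [hmin, show m + 1 - (m + 1) = 0 by omega]
          have h0 : m - min m k.toNat = 0 := by omega
          rw [h0] at hperm'
          rw [show m + 1 = min m k.toNat + 1 by omega]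
          exact hperm'
        have hstep : pvALoop nums k ((m : Int) :: rest) s
            = pvALoop nums k rest (s ++ [nums.getD m 0]) := by
          simp only [pvALoop, hget]
          rw [if_neg (by rw [hc]; simp), hadd, if_neg hev]
        rw [hstep]
        have hcast1 : (m : Int) + 1 = ((m + 1 : Nat) : Int) := by push_cast; ring
        rw [ih (m + 1) _ (by rw [hrest, hcast1]) (by omega) (by omega) hperm'' hnd']
        exact hiff01
    · -- nums[m] is in the window: a duplicate within distance k
      have hstep : pvALoop nums k ((m : Int) :: rest) s = true := by
        simp only [pvALoop, hget]
        rw [if_pos hc]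
      rw [hstep]
      obtain ⟨i, hilt, hival, hdist⟩ := hmemiff.mp hc
      simp only [true_iff]
      exact ⟨i, m, hilt, le_rfl, hmlt, hival, hdist⟩

theorem pvB_char (nums : List Int) (k : Int) :
    (containsNearbyDuplicate1_alt nums k = true ↔ pvDup nums k 0) := by
  have := pvB_iff nums k nums 0 PySem.Dict.empty (by simp)
    (by intro v j h; simp [PySem.Dict.get?_empty] at h)
    (by intro i hi; omega)
  simpa [containsNearbyDuplicate1_alt] using this

-- ===== VERDICT (by name: the statement is the Claim_ definition above) =====
theorem containsNearbyDuplicate1_spec : Claim_equal_containsNearbyDuplicate1 := by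
  intro nums k _ hpre
  unfold Spec_containsNearbyDuplicate1
  by_cases h0 : nums.length = 0 ∨ k = 0
  · have hA : containsNearbyDuplicate1 nums k = false := by
      rw [containsNearbyDuplicate1, if_pos h0]
    have hB : containsNearbyDuplicate1_alt nums k = false := by
      rw [← Bool.not_eq_true, pvB_char]
      rintro ⟨i, j, h1, h2, h3, h4, h5⟩
      rcases h0 with h | h <;> omega
    rw [hA, hB]
  · push_neg at h0
    have hk : 1 ≤ k := by unfold Pre_containsNearbyDuplicate1 at hpre; omega
    have hlen : 1 ≤ nums.length := by omega
    have hx0 : PySem.List.pyGet? nums 0 = some (nums.getD 0 0) := by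
      rw [PySem.List.pyGet?_zero, List.getElem?_eq_getElem (by omega)]
      congr 1
      exact (List.getD_eq_getElem nums 0 (by omega)).symm
    have hA : containsNearbyDuplicate1 nums k =
        pvALoop nums k (PySem.List.pyRange 1 (nums.length : Int) 1)
          (PySem.Set.ofList [nums.getD 0 0]) := by
      rw [containsNearbyDuplicate1, if_neg (by push_neg; exact h0), hx0]
    have hwin : List.Perm (PySem.Set.ofList [nums.getD 0 0])
        ((List.range' (1 - min 1 k.toNat) (min 1 k.toNat)).map (fun j => nums.getD j 0)) := by
      have hm : min 1 k.toNat = 1 := by omega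
      rw [hm]
      simp [List.range', PySem.Set.ofList, PySem.Set.add, PySem.Set.empty]
    have hAiff := pvA_iff nums k hk (PySem.List.pyRange 1 (nums.length : Int) 1) 1
      (PySem.Set.ofList [nums.getD 0 0]) (by norm_num) le_rfl hlen hwin
      (PySem.Set.nodup_ofList _)
    have hd01 : pvDup nums k 1 ↔ pvDup nums k 0 := by
      constructor
      · exact pvDup_weaken nums k 0
      · rintro ⟨i, j, h1, h2, h3, h4, h5⟩; exact ⟨i, j, h1, by omega, h3, h4, h5⟩
    rw [hA]
    rcases hb : containsNearbyDuplicate1_alt nums k with _ | _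
    · rw [← Bool.not_eq_true, hAiff, hd01, ← pvB_char, hb]; simp
    · rw [hAiff, hd01, ← pvB_char, hb]
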